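-- pv_equiv track=rewrite | github.com/daniel-reich/ubiquitous-fiesta | APNhiaMCuRSwALN63_23.py | almost_palindrome
-- ===== SOURCE A (Python) =====
-- def almost_palindrome(txt):
--   i = 0
--   k = 0
--   copy = ""
--   while i < len(txt):
--     if txt[i] != txt[-i-1]:
--       k += 1
--     i += 1
--
--   if k < 3 and k != 0:
--     return True
--   else:
--     return False
-- ===== SOURCE B (Python) =====
-- def almost_palindrome(txt):
--   # Two-pointer early-exit walk: strip matching end pairs until the first
--   # mismatched pair; then the string is one-swap-fixable iff the part strictly
--   # between that pair is itself a palindrome (checked by a reverse comparison).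
--   lo, hi = 0, len(txt) - 1
--   while lo < hi and txt[lo] == txt[hi]:
--     lo += 1
--     hi -= 1
--   if lo >= hi:
--     return False
--   inner = txt[lo + 1:hi]
--   return inner == inner[::-1]
-- ===== Notes on version B (the rewrite author's own statement) =====
-- stated objective: faster
-- what changed: B replaces A's full-range mismatch counter (k < 3 and k != 0 over every index with negative-index mirroring) by a two-pointer early-exit walk that strips matching end pairs until the first mismatched pair and then decides by one palindrome test (reverse comparison) of the slice strictly between the mismatched characters; no counter exists in B.
import Mathlib
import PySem

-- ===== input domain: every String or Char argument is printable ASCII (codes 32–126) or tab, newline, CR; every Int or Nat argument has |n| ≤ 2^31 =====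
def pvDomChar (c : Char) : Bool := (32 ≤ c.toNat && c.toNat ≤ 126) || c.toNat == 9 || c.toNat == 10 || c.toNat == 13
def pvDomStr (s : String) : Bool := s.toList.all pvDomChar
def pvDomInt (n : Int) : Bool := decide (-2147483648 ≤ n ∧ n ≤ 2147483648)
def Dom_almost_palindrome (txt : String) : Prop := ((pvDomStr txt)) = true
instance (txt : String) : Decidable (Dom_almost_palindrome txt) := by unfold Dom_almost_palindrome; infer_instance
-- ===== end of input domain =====

-- B replaces A's full-range mismatch counter by a two-pointer early-exit walk to the
-- first mismatched end pair followed by one palindrome (reverse-comparison) test of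
-- the slice strictly between the mismatched characters; same return value, no counter.

-- ===== PORT A =====
-- while i < len(txt): if txt[i] != txt[-i-1]: k += 1; then k < 3 and k != 0
-- (the unused variable 'copy' is dropped)
def almost_palindrome (txt : String) : Bool :=
  let l := txt.toList
  let k : Int := (PySem.List.pyRange 0 (l.length : Int) 1).foldl
    (fun k i => if PySem.List.pyGet? l i ≠ PySem.List.pyGet? l (-i - 1) then k + 1 else k) 0
  if k < 3 ∧ k ≠ 0 then true else false

-- ===== PORT B =====
-- the while loop of Source B: advance lo/hi inward while the end pair matches; on exit,
-- 'lo >= hi' returns False, otherwise compare inner = txt[lo+1:hi] with inner[::-1]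
-- ([::-1] is exactly List.reverse: PySem.List.slice?_none_none_neg_one)
def bWalk (l : List Char) (lo hi : Int) : Bool :=
  if _h : lo < hi ∧ PySem.List.pyGet? l lo = PySem.List.pyGet? l hi then
    bWalk l (lo + 1) (hi - 1)
  else if lo ≥ hi then
    false
  else
    let inner := PySem.List.slice l (some (lo + 1)) (some hi)
    inner == inner.reverse
termination_by (hi - lo).toNat
decreasing_by omega

def almost_palindrome_alt (txt : String) : Bool :=
  let l := txt.toList
  bWalk l 0 ((l.length : Int) - 1)

-- ===== PRECONDITION & SPEC =====
def Spec_almost_palindrome (txt : String) (out : Bool) : Prop := out = almost_palindrome_alt txt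
instance (txt : String) (out : Bool) : Decidable (Spec_almost_palindrome txt out) := by unfold Spec_almost_palindrome; infer_instance

-- ===== CLAIM (what is proved, stated in full; the proofs are below) =====
def Claim_equal_almost_palindrome : Prop := ∀ (txt : String), Dom_almost_palindrome txt → Spec_almost_palindrome txt (almost_palindrome txt)

-- ===== LEMMAS AND PROOFS =====

-- the mismatch indicator for the symmetric pair at index i
def pvMis (l : List Char) (i : ℕ) : Bool := decide (l[i]? ≠ l[l.length - 1 - i]?)

lemma pvMis_sym (l : List Char) (i : ℕ) (h : i < l.length) :
    pvMis l (l.length - 1 - i) = pvMis l i := by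
  unfold pvMis
  have : l.length - 1 - (l.length - 1 - i) = i := by omega
  rw [this]
  exact decide_eq_decide.mpr ne_comm

lemma pvMis_mid (l : List Char) (h : l.length % 2 = 1) :
    pvMis l (l.length / 2) = false := by
  unfold pvMis
  have : l.length - 1 - l.length / 2 = l.length / 2 := by omega
  simp [this]

lemma countP_range_eq_sum (P : ℕ → Bool) (n : ℕ) :
    (List.range n).countP P = ∑ i ∈ Finset.range n, (if P i then 1 else 0) := by
  induction n with
  | zero => simp
  | succ n ih =>
      rw [List.range_succ, List.countP_append, Finset.sum_range_succ, ih]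
      simp [List.countP_cons]

lemma half_sum (f : ℕ → ℕ) (n : ℕ)
    (hsym : ∀ i < n, f (n - 1 - i) = f i) (hmid : n % 2 = 1 → f (n / 2) = 0) :
    (∑ i ∈ Finset.range n, f i) = 2 * ∑ i ∈ Finset.range (n / 2), f i := by
  have hmt : n = n / 2 + (n - n / 2) := by omega
  have hupper : (∑ i ∈ Finset.range (n - n / 2), f (n / 2 + i))
      = ∑ i ∈ Finset.range (n - n / 2), f i := by
    rw [← Finset.sum_range_reflect (fun i => f (n / 2 + i)) (n - n / 2)]
    refine Finset.sum_congr rfl (fun i hi => ?_)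
    have hit : i < n - n / 2 := Finset.mem_range.mp hi
    have h1 : n / 2 + (n - n / 2 - 1 - i) = n - 1 - i := by omega
    rw [h1, hsym i (by omega)]
  rw [show Finset.range n = Finset.range (n / 2 + (n - n / 2)) from by rw [← hmt],
    Finset.sum_range_add, hupper]
  rcases Nat.mod_two_eq_zero_or_one n with he | ho
  · have htm : n - n / 2 = n / 2 := by omega
    rw [htm, two_mul]
  · have htm : n - n / 2 = n / 2 + 1 := by omega
    rw [htm, Finset.sum_range_succ, hmid ho, two_mul, add_zero]

lemma sum_full_eq_two_mul_half (l : List Char) :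
    (∑ i ∈ Finset.range l.length, (if pvMis l i then 1 else 0)) =
      2 * ∑ i ∈ Finset.range (l.length / 2), (if pvMis l i then (1:ℕ) else 0) := by
  refine half_sum _ _ (fun i hi => ?_) (fun ho => ?_)
  · rw [pvMis_sym l i hi]
  · rw [pvMis_mid l ho]; simp

-- A's loop count, reduced to the Nat count over range n
lemma countA_eq (l : List Char) :
    ((PySem.List.pyRange 0 (l.length : Int) 1).countP
      (fun i => decide (PySem.List.pyGet? l i ≠ PySem.List.pyGet? l (-i - 1))))
      = (List.range l.length).countP (pvMis l) := by
  rw [PySem.List.pyRange_one]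
  simp only [sub_zero, Int.toNat_natCast, List.countP_map]
  refine List.countP_congr (fun i hi => ?_)
  have hin : i < l.length := List.mem_range.mp hi
  unfold pvMis
  have hneg : PySem.List.pyGet? l (-(0 + (i : Int)) - 1) = l[l.length - 1 - i]? := by
    have h1 : (-(0 + (i : Int)) - 1) = -(((i + 1 : ℕ) : Int)) := by push_cast; ring
    rw [h1, PySem.List.pyGet?_neg_natCast l (i + 1) (by omega) (by omega)]
    congr 1
    omega
  simp only [Function.comp, hneg]
  have h0 : ((0 : Int) + (i : Int)) = (i : Int) := by ring
  rw [h0, PySem.List.pyGet?_natCast]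

-- A's value, characterised: exactly one mismatched symmetric pair
lemma A_char (txt : String) :
    almost_palindrome txt =
      ((List.range (txt.toList.length / 2)).countP (pvMis txt.toList) == 1) := by
  unfold almost_palindrome
  simp only [PySem.List.foldl_ite_add_one, zero_add]
  rw [countA_eq, countP_range_eq_sum, countP_range_eq_sum, sum_full_eq_two_mul_half]
  generalize (∑ i ∈ Finset.range (txt.toList.length / 2), (if pvMis txt.toList i then (1:ℕ) else 0)) = H
  by_cases h1 : H = 1
  · rw [h1]; norm_num
  · rw [if_neg (by push_cast; omega)]
    symm
    simp only [beq_iff_eq, ← Bool.not_eq_true]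
    intro hc
    exact h1 (by exact_mod_cast hc)

-- palindromicity of a list via option-indexed symmetric pairs
lemma palin_iff (s : List Char) :
    s = s.reverse ↔ ∀ i < s.length, s[i]? = s[s.length - 1 - i]? := by
  constructor
  · intro h i hi
    conv_lhs => rw [h]
    rw [List.getElem?_reverse hi]
  · intro h
    refine List.ext_getElem? (fun i => ?_)
    by_cases hi : i < s.length
    · rw [List.getElem?_reverse (by simpa using hi), h i hi]
    · rw [List.getElem?_eq_none (by omega), List.getElem?_eq_none (by simp; omega)]

-- the inner slice is a palindrome iff no symmetric pair strictly inside (lo, n-1-lo) mismatches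
lemma inner_palin (l : List Char) (lo : ℕ) (hlo : lo < l.length / 2) :
    (((l.drop (lo+1)).take (l.length - 2*lo - 2)) =
      ((l.drop (lo+1)).take (l.length - 2*lo - 2)).reverse) ↔
    ∀ t, lo + 1 ≤ t → t < l.length - 1 - lo → pvMis l t = false := by
  set n := l.length with hn
  have hn2 : 2 ≤ n := by omega
  set s := (l.drop (lo+1)).take (n - 2*lo - 2) with hs
  have hlen : s.length = n - 2*lo - 2 := by
    rw [hs, List.length_take, List.length_drop]; omega
  have hget : ∀ i, i < n - 2*lo - 2 → s[i]? = l[lo + 1 + i]? := by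
    intro i hi
    rw [hs, List.getElem?_take_of_lt hi, List.getElem?_drop]
  rw [palin_iff]
  constructor
  · intro h t ht1 ht2
    have hi : t - (lo+1) < n - 2*lo - 2 := by omega
    have := h (t - (lo+1)) (by omega)
    rw [hlen, hget _ hi, hget _ (by omega)] at this
    have e1 : lo + 1 + (t - (lo+1)) = t := by omega
    have e2 : lo + 1 + (n - 2*lo - 2 - 1 - (t - (lo+1))) = n - 1 - t := by omega
    rw [e1, e2] at this
    unfold pvMis
    rw [← hn]
    simp [this]
  · intro h i hi
    rw [hlen] at hi
    rw [hlen, hget _ hi, hget _ (by omega)]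
    have e2 : lo + 1 + (n - 2*lo - 2 - 1 - i) = n - 1 - (lo + 1 + i) := by omega
    rw [e2]
    have := h (lo + 1 + i) (by omega) (by omega)
    unfold pvMis at this
    rw [← hn] at this
    simpa using this

-- restricting 'no mismatch strictly inside' to the first half is no restriction
lemma mis_all_iff (l : List Char) (lo : ℕ) (hlo : lo < l.length / 2) :
    (∀ t, lo + 1 ≤ t → t < l.length - 1 - lo → pvMis l t = false) ↔
    (∀ t, lo + 1 ≤ t → t < l.length / 2 → pvMis l t = false) := by
  set n := l.length with hn
  constructor
  · intro h t ht1 ht2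
    exact h t ht1 (by omega)
  · intro h t ht1 ht2
    by_cases hh : t < n / 2
    · exact h t ht1 hh
    · by_cases hm : n % 2 = 1 ∧ t = n / 2
      · rw [hm.2]; exact pvMis_mid l hm.1
      · have hsym := pvMis_sym l (n - 1 - t) (by omega)
        have e : n - 1 - (n - 1 - t) = t := by omega
        rw [e] at hsym
        rw [hsym]
        exact h (n - 1 - t) (by omega) (by omega)

-- the two-pointer walk computes 'exactly one mismatched pair among indices [lo, n/2)'
lemma walk_spec (l : List Char) : ∀ (k lo : ℕ), lo + k = l.length / 2 →
    bWalk l (lo : Int) ((l.length : Int) - 1 - (lo : Int)) =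
      ((List.range' lo k).countP (pvMis l) == 1) := by
  intro k
  induction k with
  | zero =>
      intro lo hk
      rw [bWalk]
      rw [dif_neg (by rintro ⟨h1, -⟩; omega)]
      rw [if_pos (by omega)]
      simp
  | succ k ih =>
      intro lo hk
      have hlo : lo < l.length / 2 := by omega
      have hn2 : 2 ≤ l.length := by omega
      have hcast : ((l.length : Int) - 1 - (lo : Int)) = ((l.length - 1 - lo : ℕ) : Int) := by
        omega
      have hgetlo : PySem.List.pyGet? l (lo : Int) = l[lo]? := PySem.List.pyGet?_natCast l lo
      have hgethi : PySem.List.pyGet? l ((l.length : Int) - 1 - (lo : Int))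
          = l[l.length - 1 - lo]? := by
        rw [hcast, PySem.List.pyGet?_natCast]
      rw [bWalk]
      by_cases hm : pvMis l lo = true
      · -- first mismatched pair found: palindrome test of the inner slice
        have hne : l[lo]? ≠ l[l.length - 1 - lo]? := by
          unfold pvMis at hm; simpa using hm
        rw [dif_neg (by rintro ⟨-, h2⟩; rw [hgetlo, hgethi] at h2; exact hne h2)]
        rw [if_neg (by omega)]
        have hslice : PySem.List.slice l (some ((lo : Int) + 1))
            (some ((l.length : Int) - 1 - (lo : Int)))
            = (l.drop (lo+1)).take (l.length - 2*lo - 2) := by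
          have e1 : ((lo : Int) + 1) = ((lo + 1 : ℕ) : Int) := by push_cast; ring
          rw [e1, hcast, PySem.List.slice_natCast]
          congr 1
          omega
        rw [hslice]
        rw [List.range'_succ, List.countP_cons, hm, if_pos rfl]
        rw [Bool.eq_iff_iff]
        simp only [beq_iff_eq]
        rw [inner_palin l lo hlo, mis_all_iff l lo hlo]
        constructor
        · intro hall
          have h0 : (List.range' (lo+1) k).countP (pvMis l) = 0 :=
            List.countP_eq_zero.mpr (fun t ht => by
              have hmem := List.mem_range'_1.mp ht
              simp [hall t hmem.1 (by omega)])
          omega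
        · intro hc t ht1 ht2
          have h0 : (List.range' (lo+1) k).countP (pvMis l) = 0 := by omega
          have := List.countP_eq_zero.mp h0 t (List.mem_range'_1.mpr ⟨ht1, by omega⟩)
          simpa using this
      · -- matching pair: step both pointers inward
        rw [Bool.not_eq_true] at hm
        have heq : l[lo]? = l[l.length - 1 - lo]? := by
          unfold pvMis at hm; simpa using hm
        rw [dif_pos ⟨by omega, by rw [hgetlo, hgethi]; exact heq⟩]
        have e1 : ((lo : Int) + 1) = ((lo + 1 : ℕ) : Int) := by push_cast; ring
        have e2 : ((l.length : Int) - 1 - (lo : Int) - 1)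
            = ((l.length : Int) - 1 - ((lo + 1 : ℕ) : Int)) := by push_cast; ring
        rw [e1, e2, ih (lo + 1) (by omega)]
        rw [List.range'_succ, List.countP_cons, hm]
        simp

-- B's value, characterised the same way
lemma B_char (txt : String) :
    almost_palindrome_alt txt =
      ((List.range (txt.toList.length / 2)).countP (pvMis txt.toList) == 1) := by
  unfold almost_palindrome_alt
  have h := walk_spec txt.toList (txt.toList.length / 2) 0 (by omega)
  simp only [Nat.cast_zero, sub_zero] at h ⊢
  rw [h, List.range_eq_range']

-- ===== VERDICT (by name: the statement is the Claim_ definition above) =====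
theorem almost_palindrome_spec : Claim_equal_almost_palindrome := by
  intro txt _
  unfold Spec_almost_palindrome
  rw [A_char, B_char]
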